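-- pv_equiv track=rewrite | github.com/c-hydro/dryes | src/dryes/utils/parse.py | combine_options
-- ===== SOURCE A (Python) =====
-- def combine_options(old_options, new_options):
--     levels = len(old_options)
--     if levels == 1:
--         combined = []
--         for options in old_options[0]:
--             #if isinstance(options, str): breakpoint()
--             these_options = options.copy()
--             if not isinstance(new_options, list): new_options = [new_options]
--             for new_option_set in new_options:
--                 these_options_copy = these_options.copy()
--                 these_options_copy.update(new_option_set)
--                 combined.append(these_options_copy)
--
--         return combined
--
--     while len(old_options) > 1:
--         these_old_options = [old_options.pop(-1)]
--         new_options = combine_options(these_old_options, new_options)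
--
--     return combine_options(old_options, new_options)
-- ===== SOURCE B (Python) =====
-- def combine_options(old_options, new_options):
--     if not isinstance(new_options, list):
--         new_options = [new_options]
--     combos = [{}]
--     for pool in list(old_options) + [new_options]:
--         combos = [{**combo, **options} for combo in combos for options in pool]
--     return combos
-- ===== Notes on version B (the rewrite author's own statement) =====
-- stated objective: simpler
-- what changed: A's recursion plus a while-loop that pops levels off old_options is replaced by one left fold: start from [{}] and, for each level and finally new_options, extend every partial merge with every dict of that level via {**combo, **options}; same order and precedence, no recursion and no argument mutation (A empties old_options via pop; B's equivalence is about the return value).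
-- crash fix: On old_options == [] A recurses forever and raises RecursionError, while B returns the natural empty-product result: one merged copy of each dict in new_options. — e.g. on combine_options([], [[("a", "1")]]): A raises RecursionError, B returns [[("a", "1")]]
import Mathlib
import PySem

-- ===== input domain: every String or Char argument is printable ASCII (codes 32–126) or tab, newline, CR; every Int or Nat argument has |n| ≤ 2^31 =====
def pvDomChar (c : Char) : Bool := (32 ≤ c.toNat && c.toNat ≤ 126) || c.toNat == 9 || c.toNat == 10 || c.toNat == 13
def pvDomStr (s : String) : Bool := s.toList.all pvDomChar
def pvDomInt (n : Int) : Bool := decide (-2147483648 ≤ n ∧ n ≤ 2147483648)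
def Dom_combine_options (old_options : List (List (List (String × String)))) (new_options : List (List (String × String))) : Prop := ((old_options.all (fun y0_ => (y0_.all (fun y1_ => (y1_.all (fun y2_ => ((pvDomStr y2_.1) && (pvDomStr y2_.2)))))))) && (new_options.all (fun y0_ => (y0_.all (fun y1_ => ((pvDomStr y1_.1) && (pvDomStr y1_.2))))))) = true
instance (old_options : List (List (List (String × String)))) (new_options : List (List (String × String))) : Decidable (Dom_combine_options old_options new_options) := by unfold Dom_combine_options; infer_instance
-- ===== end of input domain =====

-- B replaces A's recursion + level-popping while-loop by a single left fold over the levels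
-- (objective: simpler); equivalence is about the RETURN value only — A empties old_options via pop(-1), B does not mutate it.

-- `d.copy()` followed by `d.update(n)` (and `{**d, **n}`): Python dict update on the items list `d`.
def pyUpd (d n : List (String × String)) : List (String × String) :=
  ((PySem.Dict.mk d).update n).items

-- ===== PORT A =====
-- `if not isinstance(new_options, list)` never fires: new_options is a list under the stated types.
-- The while-loop `while len(old_options) > 1: new_options = combine_options([old_options.pop(-1)], new_options)`
-- followed by `return combine_options(old_options, new_options)` is rendered as the recursion below.
def combine_options (old_options : List (List (List (String × String)))) (new_options : List (List (String × String))) : List (List (String × String)) :=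
  if old_options.length = 1 then
    (old_options.headD []).foldl
      (fun combined options =>
        new_options.foldl
          (fun combined new_option_set => combined ++ [pyUpd options new_option_set])
          combined)
      []
  else if _h : 1 < old_options.length then
    combine_options old_options.dropLast
      (combine_options [old_options.getLastD []] new_options)
  else
    []  -- old_options = []: the Python recurses forever (RecursionError); excluded by Pre_
termination_by old_options.length
decreasing_by
  · simp only [List.length_cons, List.length_nil]; omega
  · simp only [List.length_dropLast]; omega

-- ===== PORT B =====
def combine_options_alt (old_options : List (List (List (String × String)))) (new_options : List (List (String × String))) : List (List (String × String)) :=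
  (old_options ++ [new_options]).foldl
    (fun combos pool => combos.flatMap (fun combo => pool.map (fun options => pyUpd combo options)))
    [[]]

-- ===== PRECONDITION & SPEC =====
-- Pre_ excludes old_options = [], on which A raises RecursionError, and association lists with a
-- duplicated key, which are not the encoding of any Python dict (the arguments are dicts of unique keys).
def Pre_combine_options (old_options : List (List (List (String × String)))) (new_options : List (List (String × String))) : Prop :=
  old_options ≠ [] ∧
  (∀ lvl ∈ old_options, ∀ d ∈ lvl, (d.map Prod.fst).Nodup) ∧
  (∀ d ∈ new_options, (d.map Prod.fst).Nodup)
instance (old_options : List (List (List (String × String)))) (new_options : List (List (String × String))) : Decidable (Pre_combine_options old_options new_options) := by unfold Pre_combine_options; infer_instance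

def pvWitness_combine_options : (List (List (List (String × String)))) × (List (List (String × String))) :=
  ([[[("a", "1")]]], [[("b", "2")]])

-- On old_options == [] A recurses forever (RecursionError); B returns one merged copy of each dict in new_options.
def Raises_combine_options (old_options : List (List (List (String × String)))) (new_options : List (List (String × String))) : Prop :=
  old_options = []
instance (old_options : List (List (List (String × String)))) (new_options : List (List (String × String))) : Decidable (Raises_combine_options old_options new_options) := by unfold Raises_combine_options; infer_instance
def pvRaiseWitness_combine_options : (List (List (List (String × String)))) × (List (List (String × String))) :=
  ([], [[("a", "1")]])
def pvRaiseWitnessOut_combine_options : List (List (String × String)) := [[("a", "1")]]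

def Spec_combine_options (old_options : List (List (List (String × String)))) (new_options : List (List (String × String))) (out : List (List (String × String))) : Prop := out = combine_options_alt old_options new_options
instance (old_options : List (List (List (String × String)))) (new_options : List (List (String × String))) (out : List (List (String × String))) : Decidable (Spec_combine_options old_options new_options out) := by unfold Spec_combine_options; infer_instance

-- ===== CLAIM (what is proved, stated in full; the proofs are below) =====
def Claim_equal_combine_options : Prop := ∀ (old_options : List (List (List (String × String)))) (new_options : List (List (String × String))), Dom_combine_options old_options new_options → Pre_combine_options old_options new_options → Spec_combine_options old_options new_options (combine_options old_options new_options)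

def Claim_raises_combine_options : Prop := (∀ (old_options : List (List (List (String × String)))) (new_options : List (List (String × String))), Dom_combine_options old_options new_options → Raises_combine_options old_options new_options → ¬ Pre_combine_options old_options new_options) ∧ (Dom_combine_options (pvRaiseWitness_combine_options.1) (pvRaiseWitness_combine_options.2) ∧ Raises_combine_options (pvRaiseWitness_combine_options.1) (pvRaiseWitness_combine_options.2) ∧ combine_options_alt (pvRaiseWitness_combine_options.1) (pvRaiseWitness_combine_options.2) = pvRaiseWitnessOut_combine_options)

-- ===== LEMMAS AND PROOFS =====

theorem pv_dict_ext (d1 d2 : PySem.Dict String String)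
    (h1 : d1.keys.Nodup) (hk : d1.keys = d2.keys)
    (hg : ∀ x, d1.get? x = d2.get? x) : d1 = d2 := by
  apply PySem.Dict.ext
  rw [PySem.Dict.items_eq_map_keys d1 h1 "", PySem.Dict.items_eq_map_keys d2 (hk ▸ h1) "", hk]
  apply List.map_congr_left
  intro k _
  rw [PySem.Dict.getD_eq_get?_getD, PySem.Dict.getD_eq_get?_getD, hg]

theorem pv_keys_update (d : PySem.Dict String String) (ps : List (String × String)) :
    (d.update ps).keys = PySem.Set.update d.keys (ps.map Prod.fst) := by
  have := PySem.Dict.keys_foldl_insert_key (ν := String) ps Prod.fst (fun _ p => p.2) d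
  simpa [PySem.Dict.update] using this

theorem pv_get?_update (ps : List (String × String)) (d : PySem.Dict String String) (x : String) :
    (d.update ps).get? x =
      ((ps.reverse.find? (fun p => p.1 == x)).map Prod.snd).or (d.get? x) := by
  induction ps generalizing d with
  | nil => simp [PySem.Dict.update]
  | cons p rest ih =>
    have step : (d.update (p :: rest)) = (d.insert p.1 p.2).update rest := by
      simp [PySem.Dict.update]
    rw [step, ih]
    rw [List.reverse_cons, List.find?_append]
    cases hf : rest.reverse.find? (fun q => q.1 == x) with
    | some y => simp [hf]
    | none =>
      simp only [hf, Option.none_or, Option.map_none]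
      rw [PySem.Dict.get?_insert]
      by_cases hx : x = p.1
      · simp [hx]
      · have hb : (p.1 == x) = false := beq_eq_false_iff_ne.mpr (Ne.symm hx)
        simp [List.find?, hb, hx]

theorem pv_find?_mapped (l : List (String × String)) (k v x : String) :
    (l.map (fun p => if (p.1 == k) = true then (k, v) else p)).find? (fun p => p.1 == x) =
      if x = k then ((l.find? (fun p => p.1 == k)).map (fun _ => (k, v)))
      else l.find? (fun p => p.1 == x) := by
  induction l with
  | nil => simp
  | cons p rest ih =>
    simp only [List.map_cons]
    by_cases hpk : p.1 = k
    · have hfp : (if (p.1 == k) = true then (k, v) else p) = (k, v) := by simp [hpk]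
      rw [hfp]
      by_cases hx : x = k
      · rw [List.find?_cons_of_pos (by simp [hx]), if_pos hx,
          List.find?_cons_of_pos (by simp [hpk])]
        rfl
      · have hkxb : (k == x) = false := beq_eq_false_iff_ne.mpr (Ne.symm hx)
        have hpxb : (p.1 == x) = false := beq_eq_false_iff_ne.mpr (by rw [hpk]; exact Ne.symm hx)
        rw [List.find?_cons_of_neg (by simp [hkxb]), ih, if_neg hx, if_neg hx,
          List.find?_cons_of_neg (by simp [hpxb])]
    · have hfp : (if (p.1 == k) = true then (k, v) else p) = p := by
        simp [beq_eq_false_iff_ne.mpr hpk]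
      rw [hfp]
      by_cases hpx : p.1 = x
      · have hxk : ¬ x = k := fun e => hpk (hpx.trans e)
        rw [List.find?_cons_of_pos (by simp [hpx]), if_neg hxk,
          List.find?_cons_of_pos (by simp [hpx])]
      · rw [List.find?_cons_of_neg (by simp [hpx]), ih]
        by_cases hx : x = k
        · rw [if_pos hx, if_pos hx, List.find?_cons_of_neg (by simp [hpk])]
        · rw [if_neg hx, if_neg hx, List.find?_cons_of_neg (by simp [hpx])]

theorem pv_find?_items_insert (b : PySem.Dict String String) (k v x : String) :
    ((b.insert k v).items.reverse.find? (fun p => p.1 == x)) =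
      if x = k then some (k, v) else b.items.reverse.find? (fun p => p.1 == x) := by
  by_cases hc : b.contains k = true
  · rw [PySem.Dict.items_insert_of_contains b v hc, ← List.map_reverse, pv_find?_mapped]
    by_cases hx : x = k
    · rw [if_pos hx, if_pos hx]
      have hex : ∃ p ∈ b.items.reverse, (p.1 == k) = true := by
        have hk : k ∈ b.keys := (PySem.Dict.contains_iff_mem_keys b k).mp hc
        have : k ∈ b.items.map Prod.fst := by simpa [PySem.Dict.keys] using hk
        obtain ⟨p, hp, hpx⟩ := List.mem_map.mp this
        exact ⟨p, List.mem_reverse.mpr hp, by simp [hpx]⟩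
      have hs : (b.items.reverse.find? (fun p => p.1 == k)).isSome := List.find?_isSome.mpr hex
      obtain ⟨q, hq⟩ := Option.isSome_iff_exists.mp hs
      rw [hq]; rfl
    · rw [if_neg hx, if_neg hx]
  · rw [PySem.Dict.items_insert_of_not_contains b v (by simpa using hc)]
    rw [List.reverse_append]
    by_cases hx : x = k
    · simp [hx]
    · simp [beq_eq_false_iff_ne.mpr (Ne.symm hx), hx]

theorem pv_update_insert (a b : PySem.Dict String String) (ha : a.keys.Nodup) (k v : String) :
    (a.update b.items).insert k v = a.update ((b.insert k v).items) := by
  apply pv_dict_ext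
  · exact PySem.Dict.nodup_keys_insert _ _ _ (PySem.Dict.nodup_keys_update a b.items ha)
  · -- keys
    have hkeys := pv_keys_update a b.items
    rw [pv_keys_update a (b.insert k v).items]
    by_cases hc : b.contains k = true
    · have hmap : (b.insert k v).items.map Prod.fst = b.items.map Prod.fst := by
        rw [PySem.Dict.items_insert_of_contains b v hc, List.map_map]
        apply List.map_congr_left
        intro p _
        by_cases h : p.1 = k <;> simp [h]
      have hmem : k ∈ (a.update b.items).keys := by
        rw [hkeys]
        exact (PySem.Set.mem_update _ _ _).mpr
          (Or.inr (by simpa [PySem.Dict.keys] using (PySem.Dict.contains_iff_mem_keys b k).mp hc))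
      rw [hmap, PySem.Dict.keys_insert_of_contains _ v ((PySem.Dict.contains_iff_mem_keys _ k).mpr hmem),
        hkeys]
    · rw [PySem.Dict.items_insert_of_not_contains b v (by simpa using hc), List.map_append,
        PySem.Set.update_append, List.map_cons, List.map_nil]
      have hRHS : PySem.Set.update (PySem.Set.update a.keys (b.items.map Prod.fst)) [k]
          = PySem.Set.add (PySem.Set.update a.keys (b.items.map Prod.fst)) k := by
        rw [PySem.Set.update_cons, PySem.Set.update_nil]
      rw [hRHS]
      by_cases hck : (a.update b.items).contains k = true
      · rw [PySem.Dict.keys_insert_of_contains _ v hck, hkeys]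
        have hm : k ∈ PySem.Set.update a.keys (b.items.map Prod.fst) := by
          rw [← hkeys]
          exact (PySem.Dict.contains_iff_mem_keys _ k).mp hck
        rw [PySem.Set.add, if_pos ((PySem.Set.contains_iff _ _).mpr hm)]
      · rw [PySem.Dict.keys_insert_of_not_contains _ v (by simpa using hck), hkeys]
        have hm : ¬ k ∈ PySem.Set.update a.keys (b.items.map Prod.fst) := by
          rw [← hkeys]
          exact fun hmm => hck ((PySem.Dict.contains_iff_mem_keys _ k).mpr hmm)
        rw [PySem.Set.add,
          if_neg (fun hcc => hm ((PySem.Set.contains_iff _ _).mp hcc))]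
  · intro x
    rw [PySem.Dict.get?_insert, pv_get?_update, pv_get?_update, pv_find?_items_insert]
    by_cases hx : x = k
    · simp [hx]
    · rw [if_neg hx, if_neg hx]


theorem pv_update_update (a : PySem.Dict String String) (ha : a.keys.Nodup)
    (b : PySem.Dict String String) (m : List (String × String)) :
    (a.update b.items).update m = a.update ((b.update m).items) := by
  induction m generalizing b with
  | nil => simp [PySem.Dict.update]
  | cons p rest ih =>
    have h1 : (a.update b.items).update (p :: rest) = ((a.update b.items).insert p.1 p.2).update rest := by
      simp [PySem.Dict.update]
    have h2 : b.update (p :: rest) = (b.insert p.1 p.2).update rest := by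
      simp [PySem.Dict.update]
    rw [h1, h2, pv_update_insert a b ha p.1 p.2, ih (b.insert p.1 p.2)]

theorem pv_mk_items (d : PySem.Dict String String) : PySem.Dict.mk d.items = d := rfl

theorem pv_pyUpd_assoc (c o m : List (String × String)) (hc : (c.map Prod.fst).Nodup) :
    pyUpd (pyUpd c o) m = pyUpd c (pyUpd o m) := by
  unfold pyUpd
  rw [pv_mk_items, pv_mk_items]
  have ha : (PySem.Dict.mk c).keys.Nodup := by
    simpa [PySem.Dict.keys] using hc
  have := pv_update_update (PySem.Dict.mk c) ha (PySem.Dict.mk o) m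
  simpa using congrArg PySem.Dict.items this

theorem pv_pyUpd_nodup (c o : List (String × String)) (hc : (c.map Prod.fst).Nodup) :
    ((pyUpd c o).map Prod.fst).Nodup := by
  have := PySem.Dict.nodup_keys_update (PySem.Dict.mk c) o (by simpa [PySem.Dict.keys] using hc)
  simpa [pyUpd, PySem.Dict.keys] using this

theorem pv_pyUpd_nil_left (m : List (String × String)) (hm : (m.map Prod.fst).Nodup) :
    pyUpd [] m = m := by
  have h := PySem.Dict.items_foldl_insert_fresh (ν := String) m Prod.fst Prod.snd
    (PySem.Dict.mk []) (fun a _ => by simp [PySem.Dict.contains]) hm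
  simpa [pyUpd, PySem.Dict.update] using h

def pvT : List (List (List (String × String))) → List (List (String × String))
  | [] => [[]]
  | L :: rest => L.flatMap (fun o => (pvT rest).map (fun m => pyUpd o m))

theorem pv_pyUpd_nil_right (o : List (String × String)) : pyUpd o [] = o := rfl

theorem pvT_singleton (ys : List (List (String × String))) : pvT [ys] = ys := by
  simp [pvT, pv_pyUpd_nil_right]

theorem pvT_absorb (xs ys : List (List (List (String × String)))) :
    pvT (xs ++ [pvT ys]) = pvT (xs ++ ys) := by
  induction xs with
  | nil =>
    simp only [List.nil_append, pvT_singleton]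
  | cons L rest ih =>
    simp only [List.cons_append, pvT, ih]

theorem pv_A_single (L : List (List (String × String))) (new : List (List (String × String))) :
    combine_options [L] new = pvT ([L] ++ [new]) := by
  rw [combine_options]
  simp only [List.length_cons, List.length_nil, List.headD]
  rw [List.cons_append, List.nil_append, pvT, pvT_singleton]
  have inner : ∀ (o : List (String × String)) (acc : List (List (String × String))),
      new.foldl (fun combined n => combined ++ [pyUpd o n]) acc = acc ++ new.map (fun n => pyUpd o n) :=
    fun o acc => PySem.List.foldl_append_singleton_eq_map _ new acc
  calc L.foldl (fun combined o => new.foldl (fun c n => c ++ [pyUpd o n]) combined) []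
      = L.foldl (fun combined o => combined ++ new.map (fun n => pyUpd o n)) [] := by
        apply PySem.List.foldl_congr_mem
        intro acc o _
        exact inner o acc
    _ = L.flatMap (fun o => new.map (fun n => pyUpd o n)) := by
        rw [PySem.List.foldl_append_eq_flatMap]
        simp

theorem pv_A_eq (old : List (List (List (String × String)))) (hne : old ≠ [])
    (new : List (List (String × String))) :
    combine_options old new = pvT (old ++ [new]) := by
  induction old using List.reverseRecOn generalizing new with
  | nil => exact absurd rfl hne
  | append_singleton xs L ih =>
    cases xs with
    | nil => exact pv_A_single L new
    | cons x xs' =>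
      rw [combine_options]
      have hlen : ((x :: xs') ++ [L]).length = xs'.length + 2 := by simp
      rw [if_neg (by omega), dif_pos (by omega)]
      rw [List.dropLast_concat, List.getLastD_concat]
      rw [pv_A_single L new, ih (by simp) (pvT ([L] ++ [new]))]
      rw [pvT_absorb (x :: xs') ([L] ++ [new])]
      rw [← List.append_assoc]

theorem pvT_nodup (pools : List (List (List (String × String))))
    (h : ∀ L ∈ pools, ∀ d ∈ L, (d.map Prod.fst).Nodup) :
    ∀ m ∈ pvT pools, (m.map Prod.fst).Nodup := by
  induction pools with
  | nil =>
    intro m hm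
    simp [pvT] at hm
    simp [hm]
  | cons L rest _ =>
    intro m hm
    simp only [pvT, List.mem_flatMap, List.mem_map] at hm
    obtain ⟨o, ho, m', _, rfl⟩ := hm
    exact pv_pyUpd_nodup o m' (h L (by simp) o ho)

theorem pv_B_fold (pools : List (List (List (String × String))))
    (combos : List (List (String × String)))
    (hc : ∀ c ∈ combos, (c.map Prod.fst).Nodup) :
    pools.foldl
      (fun combos pool => combos.flatMap (fun combo => pool.map (fun options => pyUpd combo options)))
      combos
    = combos.flatMap (fun c => (pvT pools).map (fun m => pyUpd c m)) := by
  induction pools generalizing combos with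
  | nil =>
    simp [pvT, pv_pyUpd_nil_right]
  | cons L ps ih =>
    rw [List.foldl_cons]
    rw [ih (combos.flatMap (fun combo => L.map (fun options => pyUpd combo options)))
      (by
        intro c hc'
        simp only [List.mem_flatMap, List.mem_map] at hc'
        obtain ⟨c0, hc0, o, _, rfl⟩ := hc'
        exact pv_pyUpd_nodup c0 o (hc c0 hc0))]
    rw [List.flatMap_assoc]
    simp only [pvT]
    apply List.flatMap_congr
    intro c hcm
    rw [List.flatMap_map, List.map_flatMap]
    apply List.flatMap_congr
    intro o _
    rw [List.map_map]
    apply List.map_congr_left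
    intro m _
    exact pv_pyUpd_assoc c o m (hc c hcm)

theorem pv_B_eq (old : List (List (List (String × String)))) (new : List (List (String × String)))
    (h1 : ∀ lvl ∈ old, ∀ d ∈ lvl, (d.map Prod.fst).Nodup)
    (h2 : ∀ d ∈ new, (d.map Prod.fst).Nodup) :
    combine_options_alt old new = pvT (old ++ [new]) := by
  unfold combine_options_alt
  rw [pv_B_fold (old ++ [new]) [[]] (by intro c hc; simp at hc; simp [hc])]
  have hall : ∀ L ∈ old ++ [new], ∀ d ∈ L, (d.map Prod.fst).Nodup := by
    intro L hL
    rcases List.mem_append.mp hL with h | h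
    · exact h1 L h
    · intro d hd
      have : L = new := by simpa using h
      exact h2 d (this ▸ hd)
  simp only [List.flatMap_cons, List.flatMap_nil, List.append_nil]
  calc (pvT (old ++ [new])).map (fun m => pyUpd [] m)
      = (pvT (old ++ [new])).map id := by
        apply List.map_congr_left
        intro m hm
        exact pv_pyUpd_nil_left m (pvT_nodup (old ++ [new]) hall m hm)
    _ = pvT (old ++ [new]) := List.map_id _

-- ===== VERDICT (by name: the statement is the Claim_ definition above) =====
theorem combine_options_spec : Claim_equal_combine_options := by
  intro old new _hdom hpre
  unfold Spec_combine_options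
  obtain ⟨hne, h1, h2⟩ := hpre
  rw [pv_A_eq old hne new, pv_B_eq old new h1 h2]

theorem combine_options_raises : Claim_raises_combine_options := by
  unfold Claim_raises_combine_options
  exact ⟨fun old new _ hr hp => hp.1 hr, by decide⟩

-- witness self-check: the raise-witness lies inside Raises_ and B's port really returns the stated literal there
theorem pv_raise_witness_ok :
    Raises_combine_options pvRaiseWitness_combine_options.1 pvRaiseWitness_combine_options.2 ∧
    combine_options_alt pvRaiseWitness_combine_options.1 pvRaiseWitness_combine_options.2 = pvRaiseWitnessOut_combine_options :=
  combine_options_raises.2.2
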